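-- pv_equiv track=rewrite | github.com/Corowka/my-learning | projects/classifier/color_vector_linear.py | binary_neighbor_search
-- ===== SOURCE A (Python) =====
-- def binary_neighbor_search(arr, item):
--     l = 0
--     r = len(arr) - 1
--     mid = int((l + r) / 2)
--     while l <= r:
--         if arr[mid] < item:
--             l = mid + 1
--         elif arr[mid] > item:
--             r = mid - 1
--         else:
--             return mid
--         mid = int((l + r) / 2)
--     return mid
-- ===== SOURCE B (Python) =====
-- def binary_neighbor_search(arr, item):
--     def rec(l, r):
--         mid = int((l + r) / 2)
--         if l > r:
--             return mid
--         if arr[mid] < item: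
--             return rec(mid + 1, r)
--         if arr[mid] > item:
--             return rec(l, mid - 1)
--         return mid
--     return rec(0, len(arr) - 1)
-- ===== Notes on version B (the rewrite author's own statement) =====
-- stated objective: alternative
-- what changed: Replaced the iterative while-loop that carries l, r and mid across iterations with a recursive divide-and-conquer helper rec(l, r) that recomputes mid at each call and recurses on the half-interval.
import Mathlib
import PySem

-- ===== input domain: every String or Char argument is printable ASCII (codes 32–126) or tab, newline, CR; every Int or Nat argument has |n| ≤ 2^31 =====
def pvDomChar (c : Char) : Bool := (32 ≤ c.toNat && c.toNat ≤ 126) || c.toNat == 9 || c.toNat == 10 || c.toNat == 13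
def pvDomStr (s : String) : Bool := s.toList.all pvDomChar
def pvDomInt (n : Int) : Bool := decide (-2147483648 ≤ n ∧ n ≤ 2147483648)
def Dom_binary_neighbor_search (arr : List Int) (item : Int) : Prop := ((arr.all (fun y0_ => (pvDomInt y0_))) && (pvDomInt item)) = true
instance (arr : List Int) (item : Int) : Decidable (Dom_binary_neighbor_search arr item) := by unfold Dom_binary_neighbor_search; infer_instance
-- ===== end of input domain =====

-- B rewrites A's while-loop (with its extra carried `mid` state) as a two-parameter
-- recursive divide-and-conquer helper; objective: alternative decomposition, same cost.

-- ===== PORT A =====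
-- Python's int((l + r) / 2) truncates toward zero = Int.tdiv.
-- The fuel parameter is only a totality guard for the while-loop: each pass shrinks
-- the interval [l, r], so with fuel arr.length + 1 the 0-fuel arm is never reached.
-- arr[mid] is always in range in reachable states (0 ≤ l, l ≤ mid ≤ r ≤ len-1),
-- so Python A never raises; the .getD 0 default is unreachable.
def binarySearchLoop (arr : List Int) (item : Int) : Nat → Int → Int → Int → Int
  | 0, _, _, mid => mid
  | fuel+1, l, r, mid =>
    if l ≤ r then
      if (PySem.List.pyGet? arr mid).getD 0 < item then
        binarySearchLoop arr item fuel (mid + 1) r (Int.tdiv ((mid + 1) + r) 2)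
      else if (PySem.List.pyGet? arr mid).getD 0 > item then
        binarySearchLoop arr item fuel l (mid - 1) (Int.tdiv (l + (mid - 1)) 2)
      else mid
    else mid

def binary_neighbor_search (arr : List Int) (item : Int) : Int :=
  let l : Int := 0
  let r : Int := (arr.length : Int) - 1
  let mid : Int := Int.tdiv (l + r) 2
  binarySearchLoop arr item (arr.length + 1) l r mid

-- ===== PORT B =====
-- Needed by bnsRec's termination proof (cited in decreasing_by).
theorem tdiv_mid_bounds (l r : Int) (h : l ≤ r) : l ≤ (l+r).tdiv 2 ∧ (l+r).tdiv 2 ≤ r := by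
  rcases le_or_gt 0 (l+r) with h0 | h0
  · rw [Int.tdiv_eq_ediv_of_nonneg h0]; omega
  · have e : (l+r).tdiv 2 = -((-(l+r)).tdiv 2) := by
      rw [← Int.neg_tdiv, Int.neg_neg]
    rw [e, Int.tdiv_eq_ediv_of_nonneg (by omega : (0:Int) ≤ -(l+r))]
    omega

def bnsRec (arr : List Int) (item : Int) (l r : Int) : Int :=
  let mid := Int.tdiv (l + r) 2
  if _h : l > r then mid
  else
    if (PySem.List.pyGet? arr mid).getD 0 < item then bnsRec arr item (mid + 1) r
    else if (PySem.List.pyGet? arr mid).getD 0 > item then bnsRec arr item l (mid - 1)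
    else mid
termination_by (r - l + 1).toNat
decreasing_by
  · have := tdiv_mid_bounds l r (by omega); omega
  · have := tdiv_mid_bounds l r (by omega); omega

def binary_neighbor_search_alt (arr : List Int) (item : Int) : Int :=
  bnsRec arr item 0 ((arr.length : Int) - 1)

-- ===== PRECONDITION & SPEC =====
def Spec_binary_neighbor_search (arr : List Int) (item : Int) (out : Int) : Prop := out = binary_neighbor_search_alt arr item
instance (arr : List Int) (item : Int) (out : Int) : Decidable (Spec_binary_neighbor_search arr item out) := by unfold Spec_binary_neighbor_search; infer_instance

-- ===== CLAIM (what is proved, stated in full; the proofs are below) =====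
def Claim_equal_binary_neighbor_search : Prop := ∀ (arr : List Int) (item : Int), Dom_binary_neighbor_search arr item → Spec_binary_neighbor_search arr item (binary_neighbor_search arr item)

-- ===== LEMMAS AND PROOFS =====
theorem loop_eq_rec (arr : List Int) (item : Int) :
    ∀ (fuel : Nat) (l r : Int), (r - l + 1).toNat < fuel →
      binarySearchLoop arr item fuel l r (Int.tdiv (l + r) 2) = bnsRec arr item l r := by
  intro fuel
  induction fuel with
  | zero => intro l r h; exact absurd h (Nat.not_lt_zero _)
  | succ n ih =>
    intro l r h
    rw [bnsRec]
    simp only [binarySearchLoop]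
    by_cases hlr : l ≤ r
    · have hb := tdiv_mid_bounds l r hlr
      simp only [hlr, if_true, show ¬ l > r by omega, dif_neg, not_false_iff]
      split_ifs with h1 h2
      · exact ih (Int.tdiv (l + r) 2 + 1) r (by omega)
      · exact ih l (Int.tdiv (l + r) 2 - 1) (by omega)
      · rfl
    · simp [hlr, show l > r by omega]

-- ===== VERDICT (by name: the statement is the Claim_ definition above) =====
theorem binary_neighbor_search_spec : Claim_equal_binary_neighbor_search := by
  intro arr item _
  unfold Spec_binary_neighbor_search binary_neighbor_search binary_neighbor_search_alt
  exact loop_eq_rec arr item (arr.length + 1) 0 ((arr.length : Int) - 1) (by omega)
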